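-- pv_equiv track=rewrite | github.com/m-franc/kata | spin_around.py | spin_around
-- ===== SOURCE A (Python) =====
-- def spin_around(lst):
--     right = 0
--     left = 0
--     for dir in lst:
--         if dir == "right":
--             right += 1
--         else:
--             left += 1
--     spin_r = 0
--     spin_l = 0
--     for r in range(right):
--         if r != 0 and r % 4 == 0:
--             spin_r += 1
--     for l in range(left):
--         if l != 0 and l % 4 == 0:
--             spin_l += 1
--     total_spin = spin_r - spin_l
--     if total_spin < 0:
--         return total_spin * -1
--     else:
--         return total_spin
-- ===== SOURCE B (Python) =====
-- def spin_around(lst):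
--     right = lst.count("right")
--     left = len(lst) - right
--     return abs(max(0, (right - 1) // 4) - max(0, (left - 1) // 4))
-- ===== Notes on version B (the rewrite author's own statement) =====
-- stated objective: simpler
-- what changed: Replaced the two counting range-loops by closed-form arithmetic: each loop counts positive multiples of 4 below the count, i.e. max(0,(count-1)//4), and the direction tally uses list.count instead of an explicit loop.
import Mathlib
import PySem

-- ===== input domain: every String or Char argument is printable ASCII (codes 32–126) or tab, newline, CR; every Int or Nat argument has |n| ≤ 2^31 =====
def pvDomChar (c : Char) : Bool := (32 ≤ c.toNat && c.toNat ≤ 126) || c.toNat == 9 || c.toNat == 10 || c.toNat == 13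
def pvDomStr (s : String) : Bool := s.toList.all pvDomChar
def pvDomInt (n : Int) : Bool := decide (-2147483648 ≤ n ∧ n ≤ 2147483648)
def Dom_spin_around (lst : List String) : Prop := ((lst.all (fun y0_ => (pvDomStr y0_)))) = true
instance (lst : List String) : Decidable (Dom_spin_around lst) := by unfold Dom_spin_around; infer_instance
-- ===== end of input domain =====

-- B replaces both counting range-loops with closed-form arithmetic (and list.count); objective: simpler.

-- ===== PORT A =====
-- the two counting loops of A, one step per range element
def spin_around_loop (xs : List Int) : Int :=
  xs.foldl (fun acc r => if r ≠ 0 ∧ PySem.Int.mod r 4 = 0 then acc + 1 else acc) 0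

def spin_around (lst : List String) : Int :=
  let rl := lst.foldl (fun (p : Int × Int) dir =>
      if dir = "right" then (p.1 + 1, p.2) else (p.1, p.2 + 1)) (0, 0)
  let spin_r := spin_around_loop (PySem.List.pyRange 0 rl.1 1)
  let spin_l := spin_around_loop (PySem.List.pyRange 0 rl.2 1)
  let total_spin := spin_r - spin_l
  if total_spin < 0 then total_spin * -1 else total_spin

-- ===== PORT B =====
def spin_around_alt (lst : List String) : Int :=
  let right : Int := (lst.count "right" : Nat)
  let left : Int := (lst.length : Int) - right
  |max 0 (PySem.Int.floordiv (right - 1) 4) - max 0 (PySem.Int.floordiv (left - 1) 4)|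

-- ===== PRECONDITION & SPEC =====
def Spec_spin_around (lst : List String) (out : Int) : Prop := out = spin_around_alt lst
instance (lst : List String) (out : Int) : Decidable (Spec_spin_around lst out) := by unfold Spec_spin_around; infer_instance

-- ===== CLAIM (what is proved, stated in full; the proofs are below) =====
def Claim_equal_spin_around : Prop := ∀ (lst : List String), Dom_spin_around lst → Spec_spin_around lst (spin_around lst)

-- ===== LEMMAS AND PROOFS =====

-- A's tallying loop computes (count "right", length - count "right"), shifted by the accumulator
theorem spin_around_fold_count (lst : List String) (r l : Int) :
    lst.foldl (fun (p : Int × Int) dir =>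
      if dir = "right" then (p.1 + 1, p.2) else (p.1, p.2 + 1)) (r, l)
    = (r + (lst.count "right" : Nat), l + ((lst.length : Int) - (lst.count "right" : Nat))) := by
  induction lst generalizing r l with
  | nil => simp
  | cons x xs ih =>
    by_cases hx : x = "right" <;>
      simp [hx, ih] <;> ring

-- A's counting loop over range(n) equals the closed form (n-1)//4 clamped at 0
theorem spin_around_loop_closed (n : Nat) :
    spin_around_loop (PySem.List.pyRange 0 (n : Int) 1)
    = max 0 (PySem.Int.floordiv ((n : Int) - 1) 4) := by
  induction n with
  | zero => decide
  | succ m ih =>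
    rw [show ((m + 1 : Nat) : Int) = (m : Int) + 1 by push_cast; ring]
    rw [PySem.List.pyRange_one_succ_right (by omega : (0 : Int) ≤ (m : Int))]
    rw [spin_around_loop, List.foldl_append]
    rw [← spin_around_loop, ih]
    have hfd : ∀ a : Int, PySem.Int.floordiv a 4 = a / 4 :=
      fun a => PySem.Int.floordiv_eq_ediv_of_pos (by omega)
    have hm : PySem.Int.mod (m : Int) 4 = (m : Int) % 4 :=
      PySem.Int.mod_eq_emod_of_pos (by omega)
    simp only [List.foldl, hfd, hm]
    by_cases h0 : (m : Int) ≠ 0 ∧ (m : Int) % 4 = 0 <;> simp [h0] <;> omega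

theorem spin_around_spec_aux (lst : List String) :
    spin_around lst = spin_around_alt lst := by
  unfold spin_around spin_around_alt
  rw [spin_around_fold_count]
  have hc : (lst.count "right" : Int) ≤ (lst.length : Int) := by
    exact_mod_cast List.count_le_length
  simp only [zero_add]
  rw [spin_around_loop_closed (lst.count "right")]
  rw [show ((lst.length : Int) - (lst.count "right" : Nat))
        = ((lst.length - lst.count "right" : Nat) : Int) by omega]
  rw [spin_around_loop_closed (lst.length - lst.count "right")]
  have hfd : ∀ a : Int, PySem.Int.floordiv a 4 = a / 4 :=
    fun a => PySem.Int.floordiv_eq_ediv_of_pos (by omega)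
  simp only [hfd]
  rw [show ((lst.length - lst.count "right" : Nat) : Int)
        = (lst.length : Int) - (lst.count "right" : Nat) by omega]
  split_ifs with h
  · rw [abs_of_neg h]; ring
  · rw [abs_of_nonneg (not_lt.mp h)]

-- ===== VERDICT (by name: the statement is the Claim_ definition above) =====
theorem spin_around_spec : Claim_equal_spin_around := by
  intro lst _
  exact spin_around_spec_aux lst
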